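-- pv_equiv track=rewrite | github.com/maplesyrupman/mini_practices | zigzag.py | is_zigzag
-- ===== SOURCE A (Python) =====
-- def is_zigzag(n):
--     nstring= str(n)
--     plusminus= None
--     plusminuslast= None
--     lastidx= 0
--
--     for i in range(1,len(nstring)):
--         if nstring[lastidx] > nstring[i]:
--             plusminus= -1
--         if nstring[lastidx] < nstring[i]:
--             plusminus= 1
--         if plusminus == plusminuslast:
--             return False
--         plusminuslast= plusminus
--         lastidx+=1
--
--     return True
-- ===== SOURCE B (Python) =====
-- def is_zigzag(n):
--     s = str(n)
--     # pass 1: comparison table of adjacent characters (+1 rise, -1 fall, 0 equal)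
--     signs = []
--     for a, b in zip(s, s[1:]):
--         signs.append(1 if a < b else (-1 if a > b else 0))
--     # pass 2: zigzag iff no plateau and the direction flips at every step
--     return all(x != 0 for x in signs) and all(x != y for x, y in zip(signs, signs[1:]))
-- ===== Notes on version B (the rewrite author's own statement) =====
-- stated objective: alternative
-- what changed: B replaces A's single stateful loop (plusminus/plusminuslast/lastidx with an early return) by two separate passes: first build the table of adjacent-pair comparison signs, then check that the table has no zero and that consecutive signs differ.
import Mathlib
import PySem

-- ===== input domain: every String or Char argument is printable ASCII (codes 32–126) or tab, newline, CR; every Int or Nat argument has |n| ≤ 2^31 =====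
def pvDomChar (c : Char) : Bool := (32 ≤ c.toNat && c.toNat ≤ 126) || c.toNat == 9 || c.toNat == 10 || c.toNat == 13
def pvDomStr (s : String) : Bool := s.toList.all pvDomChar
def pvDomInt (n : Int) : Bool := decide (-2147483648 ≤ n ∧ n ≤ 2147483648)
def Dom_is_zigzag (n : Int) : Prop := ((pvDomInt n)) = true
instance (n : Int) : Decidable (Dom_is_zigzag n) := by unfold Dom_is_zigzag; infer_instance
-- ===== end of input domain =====

-- B restructures A's single stateful scan into two passes (build the sign table, then check it); same cost, return values proved equal for every Int.

-- ===== PORT A =====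
-- A's for-loop over range(1, len) with state (plusminus, plusminuslast, lastidx) and an early
-- `return False`.  Indexing uses pyGetD with a dummy default: every index the loop uses is in
-- range, so this is exact.
def isZigzagLoop (s : List Char) : List Int → Option Int → Option Int → Int → Bool
  | [], _pm, _pml, _last => true
  | i :: rest, pm, pml, last =>
      let pm1 := if PySem.List.pyGetD s last ' ' > PySem.List.pyGetD s i ' ' then some (-1 : Int) else pm
      let pm2 := if PySem.List.pyGetD s last ' ' < PySem.List.pyGetD s i ' ' then some (1 : Int) else pm1
      if pm2 = pml then false
      else isZigzagLoop s rest pm2 pm2 (last + 1)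

def is_zigzag (n : Int) : Bool :=
  let nstring := (PySem.Int.toStr n).toList
  isZigzagLoop nstring (PySem.List.pyRange 1 (nstring.length : Int) 1) none none 0

-- ===== PORT B =====
def is_zigzag_alt (n : Int) : Bool :=
  let s := (PySem.Int.toStr n).toList
  let signs := (s.zip s.tail).map (fun p => if p.1 < p.2 then (1 : Int) else if p.1 > p.2 then -1 else 0)
  signs.all (fun x => decide (x ≠ 0)) && (signs.zip signs.tail).all (fun p => decide (p.1 ≠ p.2))

-- ===== PRECONDITION & SPEC =====
def Spec_is_zigzag (n : Int) (out : Bool) : Prop := out = is_zigzag_alt n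
instance (n : Int) (out : Bool) : Decidable (Spec_is_zigzag n out) := by unfold Spec_is_zigzag; infer_instance

-- ===== CLAIM (what is proved, stated in full; the proofs are below) =====
def Claim_equal_is_zigzag : Prop := ∀ (n : Int), Dom_is_zigzag n → Spec_is_zigzag n (is_zigzag n)

-- ===== LEMMAS AND PROOFS =====

-- common reference form: one structural scan over the characters carrying the previous sign
def chk : List Char → Option Int → Bool
  | a :: b :: rest, p =>
      let pm := if a < b then some (1 : Int) else if a > b then some (-1) else p
      if pm = p then false else chk (b :: rest) pm
  | _, _ => true

def signsOf (s : List Char) : List Int :=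
  (s.zip s.tail).map (fun p => if p.1 < p.2 then (1 : Int) else if p.1 > p.2 then -1 else 0)

def bcheck (l : List Int) : Bool :=
  l.all (fun x => decide (x ≠ 0)) && (l.zip l.tail).all (fun p => decide (p.1 ≠ p.2))

def headDiff (l : List Int) (p : Option Int) : Bool :=
  match l with
  | [] => true
  | x :: _ => decide (some x ≠ p)

lemma loopA_eq_chk (s : List Char) (m : Nat) (p : Option Int) :
    isZigzagLoop s (PySem.List.pyRange ((m : Int) + 1) (s.length : Int) 1) p p (m : Int)
      = chk (s.drop m) p := by
  induction hk : s.length - m generalizing m p with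
  | zero =>
    have h1 : (s.length : Int) ≤ (m : Int) + 1 := by omega
    rw [PySem.List.pyRange_one_eq_nil h1, List.drop_eq_nil_of_le (by omega)]
    simp [isZigzagLoop, chk]
  | succ k ih =>
    have hm : m < s.length := by omega
    by_cases h2 : m + 1 < s.length
    · have hcons : PySem.List.pyRange ((m : Int) + 1) (s.length : Int) 1
          = ((m : Int) + 1) :: PySem.List.pyRange ((m : Int) + 1 + 1) (s.length : Int) 1 :=
        PySem.List.pyRange_one_cons (by omega)
      rw [hcons]
      have hd1 : s.drop m = s[m] :: s.drop (m + 1) := List.drop_eq_getElem_cons hm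
      have hd2 : s.drop (m + 1) = s[m + 1] :: s.drop (m + 2) := List.drop_eq_getElem_cons h2
      have hga : PySem.List.pyGetD s (m : Int) ' ' = s[m] := by
        rw [PySem.List.pyGetD_natCast]; exact List.getD_eq_getElem _ _ hm
      have hgb : PySem.List.pyGetD s ((m : Int) + 1) ' ' = s[m + 1] := by
        have hcast : ((m : Int) + 1) = ((m + 1 : Nat) : Int) := by push_cast; ring
        rw [hcast, PySem.List.pyGetD_natCast]; exact List.getD_eq_getElem _ _ h2
      have hrec : ((m : Int) + 1 + 1) = (((m + 1 : Nat) : Int) + 1) := by push_cast; ring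
      have hlast : ((m : Int) + 1) = ((m + 1 : Nat) : Int) := by push_cast; ring
      have ihm := fun q => ih (m + 1) q (by omega)
      simp only [isZigzagLoop, hga, hgb, hd1, hd2, chk]
      rw [hrec, hlast]
      rcases lt_trichotomy s[m] s[m + 1] with hlt | heq | hgt
      · simp only [if_pos hlt, if_neg (not_lt.mpr (le_of_lt hlt)), ← hd2]
        by_cases hp : some (1 : Int) = p
        · simp [hp]
        · simp only [hp]
          simp
          rw [hrec, hlast]
          exact ihm _
      · simp [heq]
      · simp only [if_pos hgt, if_neg (not_lt.mpr (le_of_lt hgt)), ← hd2]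
        by_cases hp : some (-1 : Int) = p
        · simp [hp]
        · simp only [hp]
          simp
          rw [hrec, hlast]
          exact ihm _
    · -- last index: the range is empty and the dropped suffix is a singleton
      have h1 : (s.length : Int) ≤ (m : Int) + 1 := by omega
      rw [PySem.List.pyRange_one_eq_nil h1]
      have hlen1 : (s.drop m).length = 1 := by simp; omega
      obtain ⟨x, hx⟩ := List.length_eq_one_iff.mp hlen1
      rw [hx]
      simp [isZigzagLoop, chk]

lemma bcheck_cons (x : Int) (l : List Int) :
    bcheck (x :: l) = (decide (x ≠ 0) && headDiff l (some x) && bcheck l) := by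
  cases l with
  | nil => simp [bcheck, headDiff]
  | cons y t =>
    simp only [bcheck, headDiff, List.all_cons, List.zip_cons_cons, List.tail_cons]
    simp only [ne_eq, decide_not, Option.some.injEq]
    have he : decide (y = x) = decide (x = y) := by simp [eq_comm]
    rw [he]
    cases decide (x = 0) <;> cases decide (x = y) <;> cases decide ((y : Int) = 0) <;>
      simp_all [Bool.and_comm]

lemma chk_eq_bcheck (cs : List Char) (p : Option Int) :
    chk cs p = (bcheck (signsOf cs) && headDiff (signsOf cs) p) := by
  induction cs generalizing p with
  | nil => simp [chk, signsOf, bcheck, headDiff]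
  | cons a t ih =>
    cases t with
    | nil => simp [chk, signsOf, bcheck, headDiff]
    | cons b rest =>
      have hs : signsOf (a :: b :: rest)
          = (if a < b then (1 : Int) else if a > b then -1 else 0) :: signsOf (b :: rest) := by
        simp [signsOf]
      rw [hs, bcheck_cons]
      rcases lt_trichotomy a b with hlt | heq | hgt
      · simp only [chk, if_pos hlt, headDiff]
        by_cases hp : some (1 : Int) = p
        · simp [Eq.symm hp]
        · rw [if_neg hp, ih (some 1)]
          cases hsl : signsOf (b :: rest) <;> simp [headDiff, hp, Bool.and_comm]
      · simp [chk, heq, headDiff]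
      · simp only [chk, if_neg (not_lt.mpr (le_of_lt hgt)), if_pos hgt, headDiff]
        by_cases hp : some (-1 : Int) = p
        · simp [Eq.symm hp]
        · rw [if_neg hp, ih (some (-1))]
          cases hsl : signsOf (b :: rest) <;> simp [headDiff, hp, Bool.and_comm]

-- ===== VERDICT (by name: the statement is the Claim_ definition above) =====
lemma headDiff_none (l : List Int) : headDiff l none = true := by
  cases l <;> simp [headDiff]

theorem is_zigzag_spec : Claim_equal_is_zigzag := by
  intro n _
  unfold Spec_is_zigzag
  have key : ∀ s : List Char,
      isZigzagLoop s (PySem.List.pyRange 1 (s.length : Int) 1) none none 0 = chk s none := by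
    intro s
    simpa using loopA_eq_chk s 0 none
  show is_zigzag n = is_zigzag_alt n
  simp only [is_zigzag, is_zigzag_alt]
  rw [key ((PySem.Int.toStr n).toList), chk_eq_bcheck, headDiff_none, Bool.and_true]
  rfl
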